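-- pv_equiv track=rewrite | github.com/lngooo/LGL-DynT4-Dev | Scripts_eva2/analyze_structural_diversity.py | max_brace_depth
-- ===== SOURCE A (Python) =====
-- def max_brace_depth(text: str) -> int:
--     depth = 0
--     max_depth = 0
--     for ch in text:
--         if ch == "{":
--             depth += 1
--             max_depth = max(max_depth, depth)
--         elif ch == "}":
--             depth = max(0, depth - 1)
--     return max_depth
-- ===== SOURCE B (Python) =====
-- def max_brace_depth(text: str) -> int:
--     s = 0
--     min_s = 0
--     ans = 0
--     for ch in text:
--         s += 1 if ch == "{" else (-1 if ch == "}" else 0)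
--         if s < min_s:
--             min_s = s
--         if s - min_s > ans:
--             ans = s - min_s
--     return ans
-- ===== Notes on version B (the rewrite author's own statement) =====
-- stated objective: alternative
-- what changed: Replaces the clamped depth counter and max-tracking branch with an unclamped prefix sum whose running minimum is subtracted, so the depth never needs the max(0, depth-1) clamp.
import Mathlib
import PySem

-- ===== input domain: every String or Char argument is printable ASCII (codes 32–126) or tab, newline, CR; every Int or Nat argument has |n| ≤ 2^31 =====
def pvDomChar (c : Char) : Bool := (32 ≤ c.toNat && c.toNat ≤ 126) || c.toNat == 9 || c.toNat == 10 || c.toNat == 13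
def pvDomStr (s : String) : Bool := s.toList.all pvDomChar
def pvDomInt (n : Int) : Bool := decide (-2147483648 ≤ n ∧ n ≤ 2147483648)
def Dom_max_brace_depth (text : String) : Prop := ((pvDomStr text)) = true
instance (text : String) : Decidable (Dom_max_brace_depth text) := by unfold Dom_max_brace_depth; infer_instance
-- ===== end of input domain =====

-- B replaces A's clamped depth counter with an unclamped prefix sum minus its running minimum (alternative decomposition, same cost).

-- ===== PORT A =====
-- clamped depth counter: state (depth, max_depth)
def max_brace_depth (text : String) : Int :=
  (text.toList.foldl (fun (st : Int × Int) ch =>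
      if ch = '{' then (st.1 + 1, max st.2 (st.1 + 1))
      else if ch = '}' then (max 0 (st.1 - 1), st.2)
      else st) (0, 0)).2

-- ===== PORT B =====
-- prefix sum with running minimum: state (s, min_s, ans)
def max_brace_depth_alt (text : String) : Int :=
  (text.toList.foldl (fun (st : Int × Int × Int) ch =>
      let s := st.1 + (if ch = '{' then 1 else if ch = '}' then -1 else 0)
      let m := if s < st.2.1 then s else st.2.1
      let a := if s - m > st.2.2 then s - m else st.2.2
      (s, m, a)) (0, 0, 0)).2.2

-- ===== PRECONDITION & SPEC =====
def Spec_max_brace_depth (text : String) (out : Int) : Prop := out = max_brace_depth_alt text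
instance (text : String) (out : Int) : Decidable (Spec_max_brace_depth text out) := by unfold Spec_max_brace_depth; infer_instance

-- ===== CLAIM (what is proved, stated in full; the proofs are below) =====
def Claim_equal_max_brace_depth : Prop := ∀ (text : String), Dom_max_brace_depth text → Spec_max_brace_depth text (max_brace_depth text)

-- ===== LEMMAS AND PROOFS =====

theorem mbd_loop_eq (l : List Char) (d m s ms a : Int)
    (h1 : d = s - ms) (h2 : ms ≤ s) (h3 : ms ≤ 0) (h4 : d ≤ m) (h5 : m = a) :
    (l.foldl (fun (st : Int × Int) ch =>
      if ch = '{' then (st.1 + 1, max st.2 (st.1 + 1))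
      else if ch = '}' then (max 0 (st.1 - 1), st.2)
      else st) (d, m)).2
    = (l.foldl (fun (st : Int × Int × Int) ch =>
      let s := st.1 + (if ch = '{' then 1 else if ch = '}' then -1 else 0)
      let m := if s < st.2.1 then s else st.2.1
      let a := if s - m > st.2.2 then s - m else st.2.2
      (s, m, a)) (s, ms, a)).2.2 := by
  induction l generalizing d m s ms a with
  | nil => simpa using h5
  | cons ch t ih =>
    simp only [List.foldl_cons]
    by_cases hb : ch = '{'
    · simp only [hb, reduceIte]
      exact ih (d + 1) (max m (d + 1)) (s + 1) (if s + 1 < ms then s + 1 else ms)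
        (if s + 1 - (if s + 1 < ms then s + 1 else ms) > a
          then s + 1 - (if s + 1 < ms then s + 1 else ms) else a)
        (by split_ifs <;> omega) (by split_ifs <;> omega) (by split_ifs <;> omega)
        (by omega) (by split_ifs <;> omega)
    · by_cases hc : ch = '}'
      · simp only [hc, reduceIte]
        exact ih (max 0 (d - 1)) m (s + -1) (if s + -1 < ms then s + -1 else ms)
          (if s + -1 - (if s + -1 < ms then s + -1 else ms) > a
            then s + -1 - (if s + -1 < ms then s + -1 else ms) else a)
          (by split_ifs <;> omega) (by split_ifs <;> omega) (by split_ifs <;> omega)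
          (by omega) (by split_ifs <;> omega)
      · simp only [if_neg hb, if_neg hc]
        exact ih d m (s + 0) (if s + 0 < ms then s + 0 else ms)
          (if s + 0 - (if s + 0 < ms then s + 0 else ms) > a
            then s + 0 - (if s + 0 < ms then s + 0 else ms) else a)
          (by split_ifs <;> omega) (by split_ifs <;> omega) (by split_ifs <;> omega)
          h4 (by split_ifs <;> omega)

-- ===== VERDICT (by name: the statement is the Claim_ definition above) =====
theorem max_brace_depth_spec : Claim_equal_max_brace_depth := by
  intro text _
  unfold Spec_max_brace_depth max_brace_depth max_brace_depth_alt
  exact mbd_loop_eq text.toList 0 0 0 0 0 rfl le_rfl le_rfl le_rfl rfl
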